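-- pv_equiv track=rewrite | github.com/cnorthwood/virtualbarcamp | virtualbarcamp/webpack.py | assets_from_manifest
-- ===== SOURCE A (Python) =====
-- def assets_from_manifest(manifest, static_base, include_integrity):
--     return {
--         entrypoint: {
--             "css": [
--                 {
--                     "url": f"{static_base}{chunk}",
--                     "integrity": manifest["assets"][chunk]["integrity"]
--                     if include_integrity
--                     else "",
--                 }
--                 for chunk in chunks
--                 if chunk.endswith(".css")
--             ],
--             "js": [
--                 {
--                     "url": f"{static_base}{chunk}",
--                     "integrity": manifest["assets"][chunk]["integrity"]
--                     if include_integrity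
--                     else "",
--                 }
--                 for chunk in chunks
--                 if chunk.endswith(".js")
--             ],
--         }
--         for entrypoint, chunks in manifest["chunks"].items()
--     }
-- ===== SOURCE B (Python) =====
-- def _asset(chunk, assets, static_base, include_integrity):
--     return {
--         "url": f"{static_base}{chunk}",
--         "integrity": assets[chunk]["integrity"] if include_integrity else "",
--     }
--
--
-- def assets_from_manifest(manifest, static_base, include_integrity):
--     assets = manifest.get("assets", {})
--     result = {}
--     for entrypoint, chunks in manifest["chunks"].items():
--         css, js = [], []
--         for chunk in chunks:
--             if chunk.endswith(".css"):
--                 css.append(_asset(chunk, assets, static_base, include_integrity))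
--             elif chunk.endswith(".js"):
--                 js.append(_asset(chunk, assets, static_base, include_integrity))
--         result[entrypoint] = {"css": css, "js": js}
--     return result
-- ===== Notes on version B (the rewrite author's own statement) =====
-- stated objective: alternative
-- what changed: Replaces A's dict comprehension with two filtering scans per entrypoint by a single pass over each entrypoint's chunks that partitions assets into css/js lists as it builds them, with the assets table fetched once up front and the asset-dict construction factored into a helper.
import Mathlib
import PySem

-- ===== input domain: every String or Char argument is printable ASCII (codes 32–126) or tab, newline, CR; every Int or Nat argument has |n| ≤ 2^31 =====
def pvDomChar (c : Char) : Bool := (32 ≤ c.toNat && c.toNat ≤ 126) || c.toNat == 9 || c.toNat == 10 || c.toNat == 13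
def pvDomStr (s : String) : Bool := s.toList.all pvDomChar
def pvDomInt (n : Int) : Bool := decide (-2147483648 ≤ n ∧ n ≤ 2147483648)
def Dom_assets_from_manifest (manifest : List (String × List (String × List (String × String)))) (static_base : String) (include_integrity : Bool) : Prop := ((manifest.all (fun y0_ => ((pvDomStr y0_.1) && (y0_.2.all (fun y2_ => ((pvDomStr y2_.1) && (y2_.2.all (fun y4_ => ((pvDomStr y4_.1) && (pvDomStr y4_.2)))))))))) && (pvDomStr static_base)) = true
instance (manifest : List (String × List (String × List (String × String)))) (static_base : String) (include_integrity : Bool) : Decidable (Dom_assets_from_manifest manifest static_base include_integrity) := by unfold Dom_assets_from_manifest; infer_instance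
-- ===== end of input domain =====

-- B builds each entrypoint's css/js lists in one partitioning pass over its chunks (assets fetched once,
-- asset construction in a helper) instead of A's two filtering comprehensions; same values, no speed claim.

-- ===== PORT A =====
-- A's inline asset-dict expression (identical in both comprehensions); looks "assets" up per chunk, as A does.
def pvAssetA (manifest : List (String × List (String × List (String × String)))) (static_base chunk : String) (include_integrity : Bool) : List (String × String) :=
  [("url", static_base ++ chunk),
   ("integrity",
     if include_integrity then
       (List.lookup "integrity" ((List.lookup chunk ((List.lookup "assets" manifest).getD [])).getD [])).getD ""
     else "")]

-- dict comprehension over manifest["chunks"].items(): ported as a map (Pre_ guarantees distinct keys);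
-- [ … for chunk in chunks if chunk.endswith(s)] ported as map-over-filter.
def assets_from_manifest (manifest : List (String × List (String × List (String × String)))) (static_base : String) (include_integrity : Bool) : List (String × List (String × List (List (String × String)))) :=
  ((List.lookup "chunks" manifest).getD []).map (fun p =>
    (p.1,
     [("css", (p.2.filter (fun c => PySem.Str.endswith c.1 ".css")).map
         (fun c => pvAssetA manifest static_base c.1 include_integrity)),
      ("js", (p.2.filter (fun c => PySem.Str.endswith c.1 ".js")).map
         (fun c => pvAssetA manifest static_base c.1 include_integrity))]))

-- ===== PORT B =====
-- Source B's _asset helper (assets table passed in, fetched once).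
def pvAssetB (assets : List (String × List (String × String))) (static_base chunk : String) (include_integrity : Bool) : List (String × String) :=
  [("url", static_base ++ chunk),
   ("integrity",
     if include_integrity then
       (List.lookup "integrity" ((List.lookup chunk assets).getD [])).getD ""
     else "")]

-- the inner single-pass partition loop over one entrypoint's chunks
def pvPartition (assets : List (String × List (String × String))) (static_base : String) (include_integrity : Bool) (chunks : List (String × String)) (acc : List (List (String × String)) × List (List (String × String))) : List (List (String × String)) × List (List (String × String)) :=
  chunks.foldl (fun acc c =>
    if PySem.Str.endswith c.1 ".css" then
      (acc.1 ++ [pvAssetB assets static_base c.1 include_integrity], acc.2)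
    else if PySem.Str.endswith c.1 ".js" then
      (acc.1, acc.2 ++ [pvAssetB assets static_base c.1 include_integrity])
    else acc) acc

def assets_from_manifest_alt (manifest : List (String × List (String × List (String × String)))) (static_base : String) (include_integrity : Bool) : List (String × List (String × List (List (String × String)))) :=
  let assets := (List.lookup "assets" manifest).getD []
  ((List.lookup "chunks" manifest).getD []).foldl (fun res p =>
    let cj := pvPartition assets static_base include_integrity p.2 ([], [])
    res ++ [(p.1, [("css", cj.1), ("js", cj.2)])]) []

-- ===== PRECONDITION & SPEC =====
-- Pre_ excludes exactly the inputs where the Python A raises KeyError (no "chunks" key, or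
-- include_integrity with some css/js chunk whose assets integrity entry is missing), and association
-- lists with duplicate keys at some dict level, which no Python dict argument can present.
def Pre_assets_from_manifest (manifest : List (String × List (String × List (String × String)))) (static_base : String) (include_integrity : Bool) : Prop :=
  (manifest.map Prod.fst).Nodup ∧
  (∀ p ∈ manifest, (p.2.map Prod.fst).Nodup ∧ ∀ q ∈ p.2, (q.2.map Prod.fst).Nodup) ∧
  (List.lookup "chunks" manifest).isSome = true ∧
  (include_integrity = true →
    ∀ p ∈ ((List.lookup "chunks" manifest).getD []), ∀ c ∈ p.2,
      (PySem.Str.endswith c.1 ".css" || PySem.Str.endswith c.1 ".js") = true →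
      (List.lookup "integrity" ((List.lookup c.1 ((List.lookup "assets" manifest).getD [])).getD [])).isSome = true)
instance (manifest : List (String × List (String × List (String × String)))) (static_base : String) (include_integrity : Bool) : Decidable (Pre_assets_from_manifest manifest static_base include_integrity) := by unfold Pre_assets_from_manifest; infer_instance

def pvWitness_assets_from_manifest : (List (String × List (String × List (String × String)))) × String × Bool :=
  ([("chunks", [("main", [("app.js", ""), ("app.css", "")])]),
    ("assets", [("app.js", [("integrity", "sha384-abc")]), ("app.css", [("integrity", "sha384-def")])])],
   "/static/", true)

def Spec_assets_from_manifest (manifest : List (String × List (String × List (String × String)))) (static_base : String) (include_integrity : Bool) (out : List (String × List (String × List (List (String × String))))) : Prop := out = assets_from_manifest_alt manifest static_base include_integrity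
instance (manifest : List (String × List (String × List (String × String)))) (static_base : String) (include_integrity : Bool) (out : List (String × List (String × List (List (String × String))))) : Decidable (Spec_assets_from_manifest manifest static_base include_integrity out) := by
  unfold Spec_assets_from_manifest
  haveI h1 : DecidableEq (List (String × List (List (String × String)))) := inferInstance
  haveI h2 : DecidableEq (String × List (String × List (List (String × String)))) := inferInstance
  infer_instance

-- ===== CLAIM (what is proved, stated in full; the proofs are below) =====
def Claim_equal_assets_from_manifest : Prop := ∀ (manifest : List (String × List (String × List (String × String)))) (static_base : String) (include_integrity : Bool), Dom_assets_from_manifest manifest static_base include_integrity → Pre_assets_from_manifest manifest static_base include_integrity → Spec_assets_from_manifest manifest static_base include_integrity (assets_from_manifest manifest static_base include_integrity)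

-- ===== LEMMAS AND PROOFS =====

-- a string ending in ".css" does not end in ".js"
lemma css_not_js (s : String) (h : PySem.Str.endswith s ".css" = true) :
    PySem.Str.endswith s ".js" = false := by
  rw [PySem.Str.endswith_eq] at *
  rw [PySem.Chars.endswith_iff] at h
  by_contra hj
  rw [Bool.not_eq_false, PySem.Chars.endswith_iff] at hj
  exact absurd (List.suffix_of_suffix_length_le hj h (by simp)) (by decide)

lemma partition_eq (assets : List (String × List (String × String))) (static_base : String) (ii : Bool)
    (l : List (String × String)) (acc : List (List (String × String)) × List (List (String × String))) :
    pvPartition assets static_base ii l acc =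
      (acc.1 ++ (l.filter (fun c => PySem.Str.endswith c.1 ".css")).map
          (fun c => pvAssetB assets static_base c.1 ii),
       acc.2 ++ (l.filter (fun c => PySem.Str.endswith c.1 ".js")).map
          (fun c => pvAssetB assets static_base c.1 ii)) := by
  induction l generalizing acc with
  | nil => simp [pvPartition]
  | cons c t ih =>
    simp only [pvPartition, List.foldl_cons] at *
    by_cases hc : PySem.Str.endswith c.1 ".css" = true
    · have hj : PySem.Str.endswith c.1 ".js" = false := css_not_js _ hc
      rw [if_pos hc, ih]
      simp only [List.filter_cons, hc, hj]
      simp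
    · have hc' : PySem.Str.endswith c.1 ".css" = false := by simp_all
      rw [if_neg hc]
      by_cases hj : PySem.Str.endswith c.1 ".js" = true
      · rw [if_pos hj, ih]
        simp only [List.filter_cons, hc', hj]
        simp
      · have hj' : PySem.Str.endswith c.1 ".js" = false := by simp_all
        rw [if_neg hj, ih]
        simp only [List.filter_cons, hc', hj']
        simp

lemma foldl_append_map {α β : Type} (g : α → β) (l : List α) (acc : List β) :
    l.foldl (fun res p => res ++ [g p]) acc = acc ++ l.map g := by
  induction l generalizing acc with
  | nil => simp
  | cons h t ih => simp [ih]

lemma assetB_eq (manifest : List (String × List (String × List (String × String)))) (static_base chunk : String) (ii : Bool) :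
    pvAssetB ((List.lookup "assets" manifest).getD []) static_base chunk ii =
      pvAssetA manifest static_base chunk ii := rfl

-- ===== VERDICT (by name: the statement is the Claim_ definition above) =====
theorem assets_from_manifest_spec : Claim_equal_assets_from_manifest := by
  intro manifest static_base include_integrity _ _
  unfold Spec_assets_from_manifest assets_from_manifest assets_from_manifest_alt
  rw [foldl_append_map]
  simp only [List.nil_append]
  apply List.map_congr_left
  intro p _
  rw [partition_eq]
  simp [assetB_eq]
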